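-- pv_equiv track=rewrite | github.com/Tomas-Tamantini/advent-of-code-python | models/aoc_2018/a2018_d21.py | optimized_chronal_conversion
-- ===== SOURCE A (Python) =====
-- def optimized_chronal_conversion(input_num: int, exit_on_first_occurrence: bool) -> int:
--     visited = set()
--     max_num_attempts = 1000
--     a = 0
--     last_a = -1
--     while True:
--         b = a | 0x10000
--         a = input_num
--         while True:
--             c = b & 0xFF
--             a += c
--             a &= 0xFFFFFF
--             a *= 65899
--             a &= 0xFFFFFF
--             if 256 > b:
--                 if exit_on_first_occurrence:
--                     return a
--                 else:
--                     if a not in visited: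
--                         visited.add(a)
--                         last_a = a
--                         max_num_attempts = 1000
--                     else:
--                         max_num_attempts -= 1
--                         if max_num_attempts == 0:
--                             return last_a
--                     break
--             b = b // 256
-- ===== SOURCE B (Python) =====
-- def optimized_chronal_conversion(input_num: int, exit_on_first_occurrence: bool) -> int:
--     def step(a):
--         digits = []
--         b = a | 0x10000
--         while b > 0:
--             digits.append(b & 0xFF)
--             b //= 256
--         acc = input_num
--         for c in digits:
--             acc = (((acc + c) & 0xFFFFFF) * 65899) & 0xFFFFFF
--         return acc
--
--     a = step(0)
--     if exit_on_first_occurrence: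
--         return a
--     seen = set()
--     prev = -1
--     while a not in seen:
--         seen.add(a)
--         prev = a
--         a = step(a)
--     return prev
-- ===== Notes on version B (the rewrite author's own statement) =====
-- stated objective: simpler
-- what changed: B drops A's 1000-consecutive-repeat countdown entirely and returns the value preceding the first repeated value (equivalent because the sequence is deterministic, so after the first repeat no new value can ever appear), and computes each round by first collecting the base-256 digits of b and then folding the transform over them instead of A's break-in-the-middle inner loop.
import Mathlib
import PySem

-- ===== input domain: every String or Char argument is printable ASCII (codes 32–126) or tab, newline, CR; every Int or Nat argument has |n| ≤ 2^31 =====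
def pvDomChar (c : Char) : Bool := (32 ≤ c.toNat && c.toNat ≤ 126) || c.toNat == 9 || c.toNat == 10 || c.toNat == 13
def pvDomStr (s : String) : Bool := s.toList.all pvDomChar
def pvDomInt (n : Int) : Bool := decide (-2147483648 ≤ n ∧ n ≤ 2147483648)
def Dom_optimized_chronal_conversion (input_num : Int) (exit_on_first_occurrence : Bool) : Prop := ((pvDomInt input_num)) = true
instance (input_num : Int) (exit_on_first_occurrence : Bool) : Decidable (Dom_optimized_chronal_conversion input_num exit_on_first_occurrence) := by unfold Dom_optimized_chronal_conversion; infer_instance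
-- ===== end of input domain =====

-- B replaces A's 1000-consecutive-repeat countdown with direct first-repeat detection
-- (equivalent because the value sequence is deterministic) and computes each round by
-- folding over the collected base-256 digits; objective: simpler.

-- ===== PORT A =====

-- bounds used by the termination measures of the ports (the loop variables are
-- masked to 24 bits / divided by 256 each round)
theorem pvBandMaskBounds (x : Int) :
    0 ≤ PySem.Int.band x 16777215 ∧ PySem.Int.band x 16777215 < 16777216 := by
  unfold PySem.Int.band
  have hand := Nat.and_le_right (n := x.toNat) (m := 16777215)
  split_ifs with h1 h2 h2 <;> simp_all <;> omega

theorem pvFloordiv256_lt {b : Int} (hb : 256 ≤ b) :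
    (PySem.Int.floordiv b 256).toNat < b.toNat ∧ 0 < PySem.Int.floordiv b 256 := by
  have h1 : PySem.Int.floordiv b 256 < b :=
    (PySem.Int.floordiv_lt_iff_lt_mul (by norm_num)).2 (by nlinarith)
  have h2 : (1 : Int) ≤ PySem.Int.floordiv b 256 :=
    (PySem.Int.le_floordiv_iff_mul_le (by norm_num)).2 (by omega)
  omega

-- inner while-loop of A: state (b, a); returns the final a
def pvInnerA (b a : Int) : Int :=
  let c := PySem.Int.band b 255
  let a1 := PySem.Int.band (PySem.Int.band (a + c) 16777215 * 65899) 16777215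
  if b < 256 then a1 else pvInnerA (PySem.Int.floordiv b 256) a1
termination_by b.toNat
decreasing_by exact (pvFloordiv256_lt (by omega)).1

theorem pvInnerA_bounds (b a : Int) : 0 ≤ pvInnerA b a ∧ pvInnerA b a < 16777216 := by
  fun_induction pvInnerA with
  | case1 b a c a1 h => exact pvBandMaskBounds _
  | case2 b a c a1 h ih => exact ih

-- number of values in [0, 2^24) not yet visited: the decreasing part of the outer measure
def pvUnvis (s : PySem.Set Int) : Nat :=
  ((Finset.range 16777216).filter (fun (n : Nat) => ¬ ((n : Int) ∈ s))).card

theorem pvUnvis_add_lt {s : PySem.Set Int} {x : Int}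
    (h0 : 0 ≤ x) (h1 : x < 16777216) (hx : x ∉ s) :
    pvUnvis (PySem.Set.add s x) < pvUnvis s := by
  apply Finset.card_lt_card
  constructor
  · intro n hn
    rw [Finset.mem_filter] at hn ⊢
    rw [PySem.Set.mem_add] at hn
    exact ⟨hn.1, fun hns => hn.2 (Or.inl hns)⟩
  · intro hsub
    have hmem : x.toNat ∈ (Finset.range 16777216).filter (fun (n : Nat) => ¬ ((n : Int) ∈ s)) := by
      simp only [Finset.mem_filter, Finset.mem_range]
      constructor
      · omega
      · simpa [Int.toNat_of_nonneg h0] using hx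
    have h2 := (Finset.mem_filter.1 (hsub hmem)).2
    rw [PySem.Set.mem_add, Int.toNat_of_nonneg h0] at h2
    exact h2 (Or.inr rfl)

-- outer while-loop of A: state (visited, last_a, max_num_attempts, a)
def pvOuterA (input_num : Int) (exit_on_first_occurrence : Bool)
    (visited : PySem.Set Int) (last_a : Int) (attempts : Nat) (a : Int) : Int :=
  let na := pvInnerA (PySem.Int.bor a 65536) input_num
  if exit_on_first_occurrence then na
  else if na ∉ visited then
    pvOuterA input_num exit_on_first_occurrence (PySem.Set.add visited na) na 1000 na
  else if attempts - 1 = 0 then last_a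
  else pvOuterA input_num exit_on_first_occurrence visited last_a (attempts - 1) na
termination_by pvUnvis visited * 1001 + attempts
decreasing_by
  · have hb := pvInnerA_bounds (PySem.Int.bor a 65536) input_num
    have := pvUnvis_add_lt hb.1 hb.2 (by assumption)
    omega
  · omega

def optimized_chronal_conversion (input_num : Int) (exit_on_first_occurrence : Bool) : Int :=
  pvOuterA input_num exit_on_first_occurrence PySem.Set.empty (-1) 1000 0

-- ===== PORT B =====

-- B's digit collection: while b > 0: digits.append(b & 0xFF); b //= 256
def pvDigitsB (b : Int) : List Int :=
  if 0 < b then PySem.Int.band b 255 :: pvDigitsB (PySem.Int.floordiv b 256) else []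
termination_by b.toNat
decreasing_by
  rename_i h
  by_cases h2 : 256 ≤ b
  · exact (pvFloordiv256_lt h2).1
  · have : PySem.Int.floordiv b 256 < 1 :=
      (PySem.Int.floordiv_lt_iff_lt_mul (by norm_num)).2 (by omega)
    omega

-- B's step: one round, as a fold of the transform over the digits
def pvStepB (input_num a : Int) : Int :=
  (pvDigitsB (PySem.Int.bor a 65536)).foldl
    (fun acc c => PySem.Int.band (PySem.Int.band (acc + c) 16777215 * 65899) 16777215)
    input_num

theorem pvStepB_cases (input_num a : Int) :
    pvStepB input_num a = input_num ∨
      (0 ≤ pvStepB input_num a ∧ pvStepB input_num a < 16777216) := by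
  unfold pvStepB
  generalize pvDigitsB (PySem.Int.bor a 65536) = l
  induction l using List.reverseRecOn with
  | nil => left; rfl
  | append_singleton xs x ih =>
    right
    rw [List.foldl_append]
    exact pvBandMaskBounds _

-- the finite set every loop value of B belongs to (for the termination measure)
def pvRangeB (input_num : Int) : Finset Int :=
  insert input_num ((Finset.range 16777216).image (fun (n : Nat) => (n : Int)))

theorem pvStepB_mem_rangeB (input_num a : Int) : pvStepB input_num a ∈ pvRangeB input_num := by
  rcases pvStepB_cases input_num a with h | h
  · rw [h]; exact Finset.mem_insert_self _ _
  · apply Finset.mem_insert_of_mem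
    exact Finset.mem_image.2 ⟨(pvStepB input_num a).toNat, Finset.mem_range.2 (by omega), by omega⟩

def pvMeasB (input_num : Int) (seen : PySem.Set Int) (a : Int) : Nat :=
  ((pvRangeB input_num).filter (fun x => ¬ (x ∈ seen))).card * 2 +
    (if a ∈ pvRangeB input_num then 0 else 1)

theorem pvMeasB_dec (input_num : Int) (seen : PySem.Set Int) (a : Int) (ha : a ∉ seen) :
    pvMeasB input_num (PySem.Set.add seen a) (pvStepB input_num a) < pvMeasB input_num seen a := by
  unfold pvMeasB
  rw [if_pos (pvStepB_mem_rangeB input_num a)]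
  have hsub : (pvRangeB input_num).filter (fun x => ¬ (x ∈ PySem.Set.add seen a)) ⊆
      (pvRangeB input_num).filter (fun x => ¬ (x ∈ seen)) := by
    intro n hn
    rw [Finset.mem_filter] at hn ⊢
    rw [PySem.Set.mem_add] at hn
    exact ⟨hn.1, fun hns => hn.2 (Or.inl hns)⟩
  by_cases hmem : a ∈ pvRangeB input_num
  · have hlt : ((pvRangeB input_num).filter (fun x => ¬ (x ∈ PySem.Set.add seen a))).card <
        ((pvRangeB input_num).filter (fun x => ¬ (x ∈ seen))).card := by
      apply Finset.card_lt_card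
      refine ⟨hsub, fun hs => ?_⟩
      have : a ∈ (pvRangeB input_num).filter (fun x => ¬ (x ∈ seen)) := by
        simp only [Finset.mem_filter]; exact ⟨hmem, ha⟩
      have h2 := (Finset.mem_filter.1 (hs this)).2
      rw [PySem.Set.mem_add] at h2
      exact h2 (Or.inr rfl)
    have := Finset.card_le_card hsub
    split_ifs <;> omega
  · rw [if_neg hmem]
    have := Finset.card_le_card hsub
    omega

-- B's cycle-detection loop: state (seen, prev, a); returns prev at the first repeat
def pvLoopB (input_num : Int) (seen : PySem.Set Int) (prev a : Int) : Int :=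
  if a ∈ seen then prev
  else pvLoopB input_num (PySem.Set.add seen a) a (pvStepB input_num a)
termination_by pvMeasB input_num seen a
decreasing_by exact pvMeasB_dec input_num seen a (by assumption)

def optimized_chronal_conversion_alt (input_num : Int) (exit_on_first_occurrence : Bool) : Int :=
  let a := pvStepB input_num 0
  if exit_on_first_occurrence then a
  else pvLoopB input_num PySem.Set.empty (-1) a

-- ===== PRECONDITION & SPEC =====
def Spec_optimized_chronal_conversion (input_num : Int) (exit_on_first_occurrence : Bool) (out : Int) : Prop := out = optimized_chronal_conversion_alt input_num exit_on_first_occurrence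
instance (input_num : Int) (exit_on_first_occurrence : Bool) (out : Int) : Decidable (Spec_optimized_chronal_conversion input_num exit_on_first_occurrence out) := by unfold Spec_optimized_chronal_conversion; infer_instance

-- ===== CLAIM (what is proved, stated in full; the proofs are below) =====
def Claim_equal_optimized_chronal_conversion : Prop := ∀ (input_num : Int) (exit_on_first_occurrence : Bool), Dom_optimized_chronal_conversion input_num exit_on_first_occurrence → Spec_optimized_chronal_conversion input_num exit_on_first_occurrence (optimized_chronal_conversion input_num exit_on_first_occurrence)

-- ===== LEMMAS AND PROOFS =====
theorem pvInner_eq_fold (b : Int) (hb : 0 < b) : ∀ acc : Int,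
    pvInnerA b acc = (pvDigitsB b).foldl
      (fun acc c => PySem.Int.band (PySem.Int.band (acc + c) 16777215 * 65899) 16777215) acc := by
  induction b using (measure Int.toNat).wf.induction with
  | _ b ih =>
    intro acc
    rw [pvInnerA, pvDigitsB, if_pos hb]
    by_cases h : b < 256
    · have h0 : PySem.Int.floordiv b 256 < 1 :=
        (PySem.Int.floordiv_lt_iff_lt_mul (by norm_num)).2 (by omega)
      rw [if_pos h, pvDigitsB, if_neg (by omega)]
      simp
    · have hd := pvFloordiv256_lt (b := b) (by omega)
      rw [if_neg h]
      simp only [List.foldl_cons]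
      exact ih _ hd.1 hd.2 _

theorem pvBorPos {a : Int} (ha : 0 ≤ a) : 0 < PySem.Int.bor a 65536 := by
  rw [PySem.Int.bor_of_nonneg ha (by norm_num)]
  have h : ((65536:Int).toNat : Nat) ≤ a.toNat ||| (65536:Int).toNat := Nat.right_le_or
  have h2 : (65536:Int).toNat = 65536 := rfl
  omega

theorem pvStep_eq (input_num a : Int) (ha : 0 ≤ a) :
    pvStepB input_num a = pvInnerA (PySem.Int.bor a 65536) input_num := by
  unfold pvStepB
  exact (pvInner_eq_fold _ (pvBorPos ha) input_num).symm

theorem pvClosed (input_num : Int) : ∀ (attempts : Nat), 1 ≤ attempts →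
    ∀ (visited : PySem.Set Int) (last_a a : Int),
    (∀ x ∈ visited, pvInnerA (PySem.Int.bor x 65536) input_num ∈ visited) →
    pvInnerA (PySem.Int.bor a 65536) input_num ∈ visited →
    pvOuterA input_num false visited last_a attempts a = last_a := by
  intro attempts
  induction attempts with
  | zero => omega
  | succ n ih =>
    intro _ visited last_a a hcl hmem
    rw [pvOuterA, if_neg (by simp), if_neg (not_not_intro hmem)]
    by_cases hn : n + 1 - 1 = 0
    · rw [if_pos hn]
    · rw [if_neg hn]
      exact ih (by omega) visited last_a _ hcl (hcl _ hmem)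

theorem pvMain (input_num : Int) : ∀ (u : Nat) (visited : PySem.Set Int) (last_a : Int),
    pvUnvis visited = u →
    last_a ∈ visited →
    (∀ x ∈ visited, x ≠ last_a → pvInnerA (PySem.Int.bor x 65536) input_num ∈ visited) →
    pvOuterA input_num false visited last_a 1000 last_a =
      pvLoopB input_num visited last_a (pvInnerA (PySem.Int.bor last_a 65536) input_num) := by
  intro u
  induction u using Nat.strong_induction_on with
  | _ u ih =>
    intro visited last_a hu hlast hcl
    have hb := pvInnerA_bounds (PySem.Int.bor last_a 65536) input_num
    by_cases hmem : pvInnerA (PySem.Int.bor last_a 65536) input_num ∈ visited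
    · have hclosed : ∀ x ∈ visited, pvInnerA (PySem.Int.bor x 65536) input_num ∈ visited := by
        intro x hx
        by_cases hx' : x = last_a
        · rw [hx']; exact hmem
        · exact hcl x hx hx'
      rw [pvLoopB, if_pos hmem, pvOuterA, if_neg (by simp), if_neg (not_not_intro hmem),
        if_neg (by norm_num)]
      exact pvClosed input_num 999 (by norm_num) visited last_a _ hclosed (hclosed _ hmem)
    · rw [pvLoopB, if_neg hmem, pvOuterA, if_neg (by simp), if_pos hmem,
        pvStep_eq input_num _ hb.1]
      have hdec := pvUnvis_add_lt hb.1 hb.2 hmem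
      refine ih (pvUnvis (PySem.Set.add visited (pvInnerA (PySem.Int.bor last_a 65536) input_num)))
        (by omega) _ _ rfl ?_ ?_
      · rw [PySem.Set.mem_add]; right; rfl
      · intro x hx hxne
        rw [PySem.Set.mem_add] at hx
        rcases hx with hx | hx
        · by_cases hxl : x = last_a
          · rw [hxl, PySem.Set.mem_add]; right; rfl
          · rw [PySem.Set.mem_add]; left; exact hcl x hx hxl
        · exact absurd hx hxne

-- ===== VERDICT (by name: the statement is the Claim_ definition above) =====
theorem optimized_chronal_conversion_spec : Claim_equal_optimized_chronal_conversion := by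
  intro input_num exit_on_first_occurrence _
  unfold Spec_optimized_chronal_conversion optimized_chronal_conversion optimized_chronal_conversion_alt
  have hstep : pvStepB input_num 0 = pvInnerA (PySem.Int.bor 0 65536) input_num :=
    pvStep_eq input_num 0 (by norm_num)
  have hb := pvInnerA_bounds (PySem.Int.bor (0:Int) 65536) input_num
  have hni : pvInnerA (PySem.Int.bor (0:Int) 65536) input_num ∉ PySem.Set.empty :=
    List.not_mem_nil
  cases exit_on_first_occurrence with
  | true =>
    rw [pvOuterA]
    simp [hstep]
  | false =>
    rw [pvOuterA, if_neg (by simp), if_pos hni]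
    simp only [hstep, Bool.false_eq_true, if_false]
    rw [pvLoopB, if_neg hni, pvStep_eq input_num _ hb.1]
    refine pvMain input_num _ _ _ rfl ?_ ?_
    · rw [PySem.Set.mem_add]; right; rfl
    · intro x hx hxne
      rw [PySem.Set.mem_add] at hx
      rcases hx with hx | hx
      · exact absurd hx List.not_mem_nil
      · exact absurd hx hxne
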